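-- pv_equiv track=rewrite | github.com/naijaprizegate/naijaprizegate-bot | handlers/mockjamb.py | sort_review_rows_by_subject_order
-- ===== SOURCE A (Python) =====
-- def sort_review_rows_by_subject_order(rows: list[dict], subject_codes: list[str]) -> list[dict]:
--     subject_order = {code: idx for idx, code in enumerate(subject_codes)}
--
--     return sorted(
--         rows,
--         key=lambda row: (
--             subject_order.get(str(row.get("subject_code") or ""), 999),
--             int(row.get("question_order") or 0),
--         ),
--     )
-- ===== SOURCE B (Python) =====
-- def sort_review_rows_by_subject_order(rows: list[dict], subject_codes: list[str]) -> list[dict]: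
--     subject_order = {code: idx for idx, code in enumerate(subject_codes)}
--
--     buckets = {}
--     for row in rows:
--         key = subject_order.get(str(row.get("subject_code") or ""), 999)
--         buckets.setdefault(key, []).append(row)
--
--     out = []
--     for key in sorted(buckets):
--         out.extend(sorted(buckets[key], key=lambda row: int(row.get("question_order") or 0)))
--     return out
-- ===== Notes on version B (the rewrite author's own statement) =====
-- stated objective: alternative
-- what changed: Replaces the single tuple-key sorted() with a group-then-sort pipeline: rows are bucketed once into a dict keyed by subject index (999 fallback), then buckets are emitted in ascending key order, each stably sorted by question_order alone.
import Mathlib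
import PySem

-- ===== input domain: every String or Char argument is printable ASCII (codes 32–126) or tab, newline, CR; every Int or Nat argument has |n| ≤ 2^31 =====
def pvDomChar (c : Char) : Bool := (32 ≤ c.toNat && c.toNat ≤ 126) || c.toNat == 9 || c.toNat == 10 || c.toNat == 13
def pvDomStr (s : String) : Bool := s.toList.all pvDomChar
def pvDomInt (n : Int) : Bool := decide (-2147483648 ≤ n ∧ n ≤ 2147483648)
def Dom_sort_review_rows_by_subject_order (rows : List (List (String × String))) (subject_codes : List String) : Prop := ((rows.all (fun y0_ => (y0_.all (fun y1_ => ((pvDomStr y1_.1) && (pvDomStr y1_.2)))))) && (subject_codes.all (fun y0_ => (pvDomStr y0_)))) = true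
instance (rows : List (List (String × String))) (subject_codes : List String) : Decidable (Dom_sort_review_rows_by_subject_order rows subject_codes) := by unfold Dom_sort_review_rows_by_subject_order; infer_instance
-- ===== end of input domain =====

-- B replaces A's single tuple-key sorted() by bucketing rows into a dict keyed by subject index
-- (999 fallback) and emitting the buckets in ascending key order, each stably sorted by
-- question order alone (objective: alternative decomposition, same asymptotic cost).

-- shared helpers: both Pythons contain these identical subexpressions
-- {code: idx for idx, code in enumerate(subject_codes)}
def pvSubjectOrder (subject_codes : List String) : PySem.Dict String Int :=
  (PySem.List.enumerate subject_codes).foldl (fun d p => d.insert p.2 p.1) PySem.Dict.empty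

-- subject_order.get(str(row.get("subject_code") or ""), 999)   (str(v or "") = first-match value or "")
def pvSubjKey (so : PySem.Dict String Int) (row : List (String × String)) : Int :=
  so.getD ((PySem.Dict.mk row).getD "subject_code" "") 999

-- int(row.get("question_order") or 0); the .getD 0 arm is unreached under Pre_ (int() would raise)
def pvQKey (row : List (String × String)) : Int :=
  match (PySem.Dict.mk row).get? "question_order" with
  | none => 0
  | some s => if s = "" then 0 else (PySem.Int.ofStr? s).getD 0

-- ===== PORT A =====
def sort_review_rows_by_subject_order (rows : List (List (String × String))) (subject_codes : List String) : List (List (String × String)) :=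
  let subject_order := pvSubjectOrder subject_codes
  PySem.List.sorted2 rows (fun row => pvSubjKey subject_order row) (fun row => pvQKey row) false

-- ===== PORT B =====
def sort_review_rows_by_subject_order_alt (rows : List (List (String × String))) (subject_codes : List String) : List (List (String × String)) :=
  let subject_order := pvSubjectOrder subject_codes
  -- buckets.setdefault(key, []).append(row)
  let buckets : PySem.Dict Int (List (List (String × String))) :=
    rows.foldl (fun d row => d.modify (pvSubjKey subject_order row) [] (fun b => b ++ [row])) PySem.Dict.empty
  -- for key in sorted(buckets): out.extend(sorted(buckets[key], key=...))
  (PySem.List.sorted buckets.keys (fun k => k) false).foldl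
    (fun out k => out ++ PySem.List.sorted (buckets.getD k []) (fun row => pvQKey row) false) []

-- ===== PRECONDITION & SPEC =====
-- Pre_ excludes exactly the inputs where A raises ValueError: a row whose "question_order"
-- value is a non-empty string that int() cannot parse.
def Pre_sort_review_rows_by_subject_order (rows : List (List (String × String))) (subject_codes : List String) : Prop :=
  ∀ row ∈ rows, (((PySem.Dict.mk row).get? "question_order").all
    (fun s => s == "" || (PySem.Int.ofStr? s).isSome)) = true

instance (rows : List (List (String × String))) (subject_codes : List String) : Decidable (Pre_sort_review_rows_by_subject_order rows subject_codes) := by unfold Pre_sort_review_rows_by_subject_order; infer_instance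

def pvWitness_sort_review_rows_by_subject_order : (List (List (String × String))) × List String :=
  ([[("subject_code", "eng"), ("question_order", "2")], [("subject_code", "m"), ("question_order", "1")], [("question_order", "")]], ["m", "eng"])

def Spec_sort_review_rows_by_subject_order (rows : List (List (String × String))) (subject_codes : List String) (out : List (List (String × String))) : Prop := out = sort_review_rows_by_subject_order_alt rows subject_codes
instance (rows : List (List (String × String))) (subject_codes : List String) (out : List (List (String × String))) : Decidable (Spec_sort_review_rows_by_subject_order rows subject_codes out) := by unfold Spec_sort_review_rows_by_subject_order; infer_instance

-- ===== CLAIM (what is proved, stated in full; the proofs are below) =====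
def Claim_equal_sort_review_rows_by_subject_order : Prop := ∀ (rows : List (List (String × String))) (subject_codes : List String), Dom_sort_review_rows_by_subject_order rows subject_codes → Pre_sort_review_rows_by_subject_order rows subject_codes → Spec_sort_review_rows_by_subject_order rows subject_codes (sort_review_rows_by_subject_order rows subject_codes)

-- ===== LEMMAS AND PROOFS =====

-- the lexicographic `before` predicate hidden inside PySem.List.sorted2
def pvLex {α : Type} (k1 k2 : α → Int) (a b : α) : Bool :=
  decide (k1 a < k1 b) || (!decide (k1 b < k1 a) && decide (k2 a < k2 b))

lemma pv_sorted2_eq {α : Type} (xs : List α) (k1 k2 : α → Int) :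
    PySem.List.sorted2 xs k1 k2 false =
      xs.foldl (fun acc x => PySem.List.insertBy (pvLex k1 k2) x acc) [] := rfl

lemma pv_insertBy_all_true {α : Type} (before : α → α → Bool) (x : α) (l : List α)
    (h : ∀ y ∈ l, before x y = true) :
    PySem.List.insertBy before x l = x :: l := by
  cases l with
  | nil => simp [PySem.List.insertBy]
  | cons y ys => simp [PySem.List.insertBy, h y (by simp)]

lemma pv_insertBy_split {α : Type} (before : α → α → Bool) (x : α) (l t : List α) :
    PySem.List.insertBy before x (l ++ t) =
      if l.all (fun y => !before x y) then l ++ PySem.List.insertBy before x t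
      else PySem.List.insertBy before x l ++ t := by
  induction l with
  | nil => simp
  | cons y ys ih =>
    by_cases hy : before x y = true
    · simp [PySem.List.insertBy, hy]
    · have hy' : before x y = false := by simpa using hy
      simp only [List.cons_append, PySem.List.insertBy, hy', Bool.false_eq_true, if_false,
        List.all_cons, Bool.not_false, Bool.true_and, ih]
      split <;> simp

lemma pv_insertBy_all_false {α : Type} (before : α → α → Bool) (x : α) (l : List α)
    (h : ∀ y ∈ l, before x y = false) :
    PySem.List.insertBy before x l = l ++ [x] := by
  have hs := pv_insertBy_split before x l []
  simp only [List.append_nil] at hs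
  rw [hs, if_pos (by simpa using h)]
  simp [PySem.List.insertBy]

lemma pv_insertBy_congr {α : Type} (b1 b2 : α → α → Bool) (x : α) (l : List α)
    (h : ∀ y ∈ l, b1 x y = b2 x y) :
    PySem.List.insertBy b1 x l = PySem.List.insertBy b2 x l := by
  induction l with
  | nil => rfl
  | cons y ys ih =>
    simp only [PySem.List.insertBy, h y (by simp)]
    rw [ih (fun y hy => h y (by simp [hy]))]

lemma pv_flatMap_congr {α β : Type} (l : List α) (f g : α → List β)
    (h : ∀ a ∈ l, f a = g a) : l.flatMap f = l.flatMap g := by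
  induction l with
  | nil => rfl
  | cons a l ih =>
    simp only [List.flatMap_cons, h a (by simp)]
    rw [ih (fun a ha => h a (by simp [ha]))]

-- inserting x into a list grouped by strictly increasing k1-keys
lemma pv_insert_grouped {α : Type} (k1 k2 : α → Int) (x : α)
    (ks : List Int) (B : Int → List α)
    (hpw : ks.Pairwise (· < ·))
    (hkey : ∀ k ∈ ks, ∀ r ∈ B k, k1 r = k)
    (habs : k1 x ∉ ks → B (k1 x) = []) :
    PySem.List.insertBy (pvLex k1 k2) x (ks.flatMap B) =
      (if k1 x ∈ ks then ks else PySem.List.insertBy (fun a b => decide (a < b)) (k1 x) ks).flatMap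
        (fun k => if k = k1 x then PySem.List.insertBy (fun a b => decide (k2 a < k2 b)) x (B k) else B k) := by
  induction ks with
  | nil =>
    have hB : B (k1 x) = [] := habs (by simp)
    simp [PySem.List.insertBy, hB]
  | cons k ks ih =>
    have hklt : ∀ k' ∈ ks, k < k' := fun k' h => List.rel_of_pairwise_cons hpw h
    have hpw' : ks.Pairwise (· < ·) := hpw.of_cons
    have hkey' : ∀ k' ∈ ks, ∀ r ∈ B k', k1 r = k' := fun k' h => hkey k' (List.mem_cons_of_mem _ h)
    have hkeyk : ∀ r ∈ B k, k1 r = k := hkey k (by simp)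
    rcases lt_trichotomy (k1 x) k with hlt | heq | hgt
    · -- k1 x < k : the new key is smaller than every present key
      have hnm : k1 x ∉ k :: ks := by
        intro hm
        rcases List.mem_cons.mp hm with h | h
        · omega
        · exact absurd (hklt _ h) (by omega)
      have hall : ∀ y ∈ (k :: ks).flatMap B, pvLex k1 k2 x y = true := by
        intro y hy
        rcases List.mem_flatMap.mp hy with ⟨k', hk', hyk⟩
        have hy1 : k1 y = k' := hkey k' hk' y hyk
        have hlt' : k1 x < k1 y := by
          rcases List.mem_cons.mp hk' with h | h
          · omega
          · have := hklt _ h; omega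
        simp [pvLex, hlt']
      rw [pv_insertBy_all_true _ _ _ hall, if_neg hnm]
      have hins : PySem.List.insertBy (fun a b => decide (a < b)) (k1 x) (k :: ks) = k1 x :: k :: ks := by
        simp [PySem.List.insertBy, hlt]
      have hrest : ks.flatMap (fun k' => if k' = k1 x then PySem.List.insertBy (fun a b => decide (k2 a < k2 b)) x (B k') else B k') = ks.flatMap B := by
        refine pv_flatMap_congr _ _ _ ?_
        intro a ha
        refine if_neg (fun h => hnm ?_)
        rw [← h]
        exact List.mem_cons_of_mem _ ha
      rw [hins]
      simp only [List.flatMap_cons, hrest]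
      simp [PySem.List.insertBy, habs hnm, show ¬ (k = k1 x) by omega]
    · -- k1 x = k : x joins the head group
      have hmem : k1 x ∈ k :: ks := by rw [heq]; simp
      have hcong : ∀ y ∈ B k, pvLex k1 k2 x y = decide (k2 x < k2 y) := by
        intro y hy
        have h1 : k1 y = k := hkeyk y hy
        simp [pvLex, h1, heq]
      have hrest : ks.flatMap (fun k' => if k' = k1 x then PySem.List.insertBy (fun a b => decide (k2 a < k2 b)) x (B k') else B k') = ks.flatMap B := by
        refine pv_flatMap_congr _ _ _ ?_
        intro a ha
        have := hklt _ ha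
        rw [if_neg (by omega)]
      rw [if_pos hmem, List.flatMap_cons, List.flatMap_cons, hrest, if_pos heq.symm,
        pv_insertBy_split]
      by_cases hc : (B k).all (fun y => !pvLex k1 k2 x y) = true
      · rw [if_pos hc]
        have hallrest : ∀ y ∈ ks.flatMap B, pvLex k1 k2 x y = true := by
          intro y hy
          rcases List.mem_flatMap.mp hy with ⟨k', hk', hyk⟩
          have hy1 : k1 y = k' := hkey' k' hk' y hyk
          have hk'' := hklt _ hk'
          have hx : k1 x < k1 y := by omega
          simp [pvLex, hx]
        rw [pv_insertBy_all_true _ _ _ hallrest]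
        have hBx : PySem.List.insertBy (fun a b => decide (k2 a < k2 b)) x (B k) = B k ++ [x] := by
          refine pv_insertBy_all_false _ _ _ ?_
          intro y hy
          show decide (k2 x < k2 y) = false
          have h4 : pvLex k1 k2 x y = false := by
            have h3 := List.all_eq_true.mp hc y hy
            simpa using h3
          rw [← hcong y hy, h4]
        rw [hBx]
        simp
      · rw [if_neg hc]
        rw [pv_insertBy_congr (pvLex k1 k2) (fun a b => decide (k2 a < k2 b)) x (B k)
          (fun y hy => hcong y hy)]
    · -- k < k1 x : x passes the head group untouched
      have hne : k1 x ≠ k := by omega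
      have hfalse : ∀ y ∈ B k, pvLex k1 k2 x y = false := by
        intro y hy
        have h1 : k1 y = k := hkeyk y hy
        simp [pvLex, h1, hgt, show ¬ (k1 x < k) by omega]
      have habs' : k1 x ∉ ks → B (k1 x) = [] := fun h => habs (by
        intro hm
        rcases List.mem_cons.mp hm with h' | h'
        · exact hne h'
        · exact h h')
      rw [List.flatMap_cons, pv_insertBy_split, if_pos (by
        rw [List.all_eq_true]
        intro y hy
        rw [hfalse y hy]
        rfl)]
      rw [ih hpw' hkey' habs']
      by_cases hm : k1 x ∈ ks
      · rw [if_pos hm, if_pos (List.mem_cons_of_mem _ hm), List.flatMap_cons,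
          if_neg (fun h => hne h.symm)]
      · rw [if_neg hm, if_neg (by
          intro hmm
          rcases List.mem_cons.mp hmm with h' | h'
          · exact hne h'
          · exact hm h')]
        have hins : PySem.List.insertBy (fun a b => decide (a < b)) (k1 x) (k :: ks)
            = k :: PySem.List.insertBy (fun a b => decide (a < b)) (k1 x) ks := by
          simp [PySem.List.insertBy, show ¬ (k1 x < k) by omega]
        rw [hins, List.flatMap_cons, if_neg (fun h => hne h.symm)]

lemma pv_sorted_append {α : Type} (l : List α) (x : α) (key : α → Int) :
    PySem.List.sorted (l ++ [x]) key false =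
      PySem.List.insertBy (fun a b => decide (key a < key b)) x (PySem.List.sorted l key false) := by
  rw [PySem.List.sorted_eq_foldl_insertBy, PySem.List.sorted_eq_foldl_insertBy, List.foldl_append]
  rfl

lemma pv_dedup_append {α : Type} [BEq α] [LawfulBEq α] (l : List α) (a : α) :
    PySem.List.dedup (l ++ [a]) =
      if a ∈ l then PySem.List.dedup l else PySem.List.dedup l ++ [a] := by
  simp only [PySem.List.dedup_eq_ofList, PySem.Set.ofList_eq_foldl, List.foldl_append,
    List.foldl_cons, List.foldl_nil]
  rw [show (List.foldl PySem.Set.add [] l) = PySem.Set.ofList l from (PySem.Set.ofList_eq_foldl l).symm]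
  by_cases h : a ∈ l
  · rw [if_pos h]
    simp [PySem.Set.add, PySem.Set.contains, PySem.Set.mem_ofList, h]
  · rw [if_neg h]
    simp [PySem.Set.add, PySem.Set.contains, PySem.Set.mem_ofList, h]

-- stable lexicographic sort = sorted distinct primary keys, each group stably sorted by the secondary key
lemma pv_sorted2_groups {α : Type} (k1 k2 : α → Int) (xs : List α) :
    PySem.List.sorted2 xs k1 k2 false =
      (PySem.List.sorted (PySem.List.dedup (xs.map k1)) (fun k => k) false).flatMap
        (fun k => PySem.List.sorted (xs.filter (fun r => k1 r == k)) k2 false) := by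
  induction xs using List.reverseRecOn with
  | nil => rfl
  | append_singleton ys x ih =>
    have hL : PySem.List.sorted2 (ys ++ [x]) k1 k2 false
        = PySem.List.insertBy (pvLex k1 k2) x (PySem.List.sorted2 ys k1 k2 false) := by
      rw [pv_sorted2_eq, pv_sorted2_eq, List.foldl_append]
      rfl
    have hpw : (PySem.List.sorted (PySem.List.dedup (ys.map k1)) (fun k => k) false).Pairwise (· < ·) := by
      rw [PySem.List.dedup_eq_ofList]
      exact PySem.List.sorted_ofList_pairwise_lt _
    have hkey : ∀ k ∈ PySem.List.sorted (PySem.List.dedup (ys.map k1)) (fun k => k) false,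
        ∀ r ∈ PySem.List.sorted (ys.filter (fun r' => k1 r' == k)) k2 false, k1 r = k := by
      intro k _ r hr
      have hrf := (PySem.List.mem_sorted _ _ _ _).mp hr
      exact eq_of_beq (List.mem_filter.mp hrf).2
    have hmemiff : ∀ z : Int, z ∈ PySem.List.sorted (PySem.List.dedup (ys.map k1)) (fun k => k) false ↔ z ∈ ys.map k1 := by
      intro z
      rw [PySem.List.mem_sorted, PySem.List.mem_dedup]
    have hfilnil : k1 x ∉ ys.map k1 → ys.filter (fun r => k1 r == k1 x) = [] := by
      intro h
      rw [List.filter_eq_nil_iff]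
      intro r hr hbeq
      exact h (List.mem_map.mpr ⟨r, hr, eq_of_beq hbeq⟩)
    have habs : k1 x ∉ PySem.List.sorted (PySem.List.dedup (ys.map k1)) (fun k => k) false →
        PySem.List.sorted (ys.filter (fun r' => k1 r' == k1 x)) k2 false = [] := by
      intro h
      rw [hfilnil (fun hm => h ((hmemiff _).mpr hm))]
      rfl
    rw [hL, ih, pv_insert_grouped k1 k2 x _
      (fun k => PySem.List.sorted (ys.filter (fun r' => k1 r' == k)) k2 false) hpw hkey habs]
    have hmap : (ys ++ [x]).map k1 = ys.map k1 ++ [k1 x] := by simp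
    by_cases hmem : k1 x ∈ ys.map k1
    · rw [if_pos ((hmemiff _).mpr hmem), hmap, pv_dedup_append, if_pos hmem]
      refine pv_flatMap_congr _ _ _ ?_
      intro k hk
      by_cases hkx : k = k1 x
      · rw [if_pos hkx, hkx, List.filter_append,
          show ([x].filter (fun r => k1 r == k1 x)) = [x] by simp, pv_sorted_append]
      · rw [if_neg hkx, List.filter_append,
          show ([x].filter (fun r => k1 r == k)) = [] by
            simp [show (k1 x == k) = false from beq_eq_false_iff_ne.mpr (fun h => hkx h.symm)],
          List.append_nil]
    · rw [if_neg (fun h => hmem ((hmemiff _).mp h)), hmap, pv_dedup_append, if_neg hmem]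
      have hkeyid : PySem.List.sorted (PySem.List.dedup (ys.map k1) ++ [k1 x]) (fun k => k) false
          = PySem.List.insertBy (fun a b => decide (a < b)) (k1 x)
              (PySem.List.sorted (PySem.List.dedup (ys.map k1)) (fun k => k) false) := by
        rw [pv_sorted_append]
      rw [hkeyid]
      refine pv_flatMap_congr _ _ _ ?_
      intro k hk
      rcases (PySem.List.mem_insertBy _ _ _ _).mp hk with hkx | hkin
      · rw [if_pos hkx, hkx, List.filter_append, hfilnil hmem,
          show ([x].filter (fun r => k1 r == k1 x)) = [x] by simp]
        rfl
      · have hne : k ≠ k1 x := fun h => hmem (h ▸ (hmemiff k).mp hkin)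
        rw [if_neg hne, List.filter_append,
          show ([x].filter (fun r => k1 r == k)) = [] by
            simp [show (k1 x == k) = false from beq_eq_false_iff_ne.mpr (fun h => hne h.symm)],
          List.append_nil]

-- B's port rewritten as the grouped flatMap form
lemma pv_alt_eq (rows : List (List (String × String))) (subject_codes : List String) :
    sort_review_rows_by_subject_order_alt rows subject_codes =
      (PySem.List.sorted (PySem.List.dedup (rows.map (fun row => pvSubjKey (pvSubjectOrder subject_codes) row))) (fun k => k) false).flatMap
        (fun k => PySem.List.sorted (rows.filter (fun r => pvSubjKey (pvSubjectOrder subject_codes) r == k)) (fun row => pvQKey row) false) := by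
  unfold sort_review_rows_by_subject_order_alt
  dsimp only
  have hfold : rows.foldl (fun d row => d.modify (pvSubjKey (pvSubjectOrder subject_codes) row) [] (fun b => b ++ [row])) PySem.Dict.empty
      = (rows.map (fun r => (pvSubjKey (pvSubjectOrder subject_codes) r, r))).foldl (fun d p => d.modify p.1 [] (fun b => b ++ [p.2])) PySem.Dict.empty := by
    rw [List.foldl_map]
  rw [hfold, PySem.List.foldl_append_eq_flatMap, List.nil_append]
  have hkeys : ((rows.map (fun r => (pvSubjKey (pvSubjectOrder subject_codes) r, r))).foldl (fun d p => d.modify p.1 [] (fun b => b ++ [p.2])) PySem.Dict.empty).keys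
      = PySem.List.dedup (rows.map (fun row => pvSubjKey (pvSubjectOrder subject_codes) row)) := by
    rw [PySem.Dict.keys_foldl_modify_key, PySem.Dict.keys_empty, PySem.List.dedup_eq_ofList,
      PySem.Set.ofList_eq_foldl, List.map_map]
    simp only [PySem.Set.update, Function.comp_def]
  have hget : ∀ k : Int, ((rows.map (fun r => (pvSubjKey (pvSubjectOrder subject_codes) r, r))).foldl (fun d p => d.modify p.1 [] (fun b => b ++ [p.2])) PySem.Dict.empty).getD k []
      = rows.filter (fun r => pvSubjKey (pvSubjectOrder subject_codes) r == k) := by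
    intro k
    rw [PySem.Dict.getD_foldl_modify_append, PySem.Dict.getD_empty]
    simp [List.filter_map, List.map_map, Function.comp_def]
  rw [hkeys]
  exact pv_flatMap_congr _ _ _ (fun k _ => by rw [hget])

-- ===== VERDICT (by name: the statement is the Claim_ definition above) =====
theorem sort_review_rows_by_subject_order_spec : Claim_equal_sort_review_rows_by_subject_order := by
  intro rows subject_codes _dom _pre
  unfold Spec_sort_review_rows_by_subject_order
  rw [pv_alt_eq]
  unfold sort_review_rows_by_subject_order
  dsimp only
  exact pv_sorted2_groups (fun row => pvSubjKey (pvSubjectOrder subject_codes) row) (fun row => pvQKey row) rows
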